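-- pv_equiv track=rewrite | github.com/giosava94/json2ioc | src/json2ioc/substitutions.py | find_lines_to_replace
-- ===== SOURCE A (Python) =====
-- def find_lines_to_replace(inp_text, start=0):
--     """
--     In the given input text, starting from the given start index,
--     find all blocks of code, splitting them into lines,
--     where the replace action must take place.
--     Return the lines to replace and the last index
--     of the text block to replace.
--     """
--
--     if type(inp_text) != str:
--         raise TypeError(
--             "'inp_text' must be str. Received type is '%s'" % type(inp_text)
--         )
--     if type(start) != int:
--         msg = "'start' must be an int greater or equal than 0. "
--         msg += "Received value is '%s'" % type(start)
--         raise TypeError(msg)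
--     elif start < 0:
--         msg = "'start' must be an int greater or equal than 0. "
--         msg += "Received value is '%d'" % start
--         raise TypeError(msg)
--
--     inp_lines = []
--     end = start
--     counter = 0
--     while end < len(inp_text) - 1:
--         if inp_text[end] == "{":
--             counter += 1
--         elif inp_text[end] == "}":
--             counter -= 1
--             if counter == -1:
--                 break
--         elif inp_text[end] == "\n":
--             inp_lines.append(inp_text[start : end + 1])
--             start = end + 1
--         end += 1
--     return inp_lines, end + 1
-- ===== SOURCE B (Python) =====
-- def find_lines_to_replace(inp_text, start=0):
--     """
--     Two-pass rewrite: pass one runs only the brace counter to find the stop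
--     index; pass two splits the scanned region on '\n' to build the lines.
--     """
--     if type(inp_text) != str:
--         raise TypeError(
--             "'inp_text' must be str. Received type is '%s'" % type(inp_text)
--         )
--     if type(start) != int:
--         msg = "'start' must be an int greater or equal than 0. "
--         msg += "Received value is '%s'" % type(start)
--         raise TypeError(msg)
--     elif start < 0:
--         msg = "'start' must be an int greater or equal than 0. "
--         msg += "Received value is '%d'" % start
--         raise TypeError(msg)
--
--     n = len(inp_text)
--     end = start
--     counter = 0
--     while end < n - 1:
--         c = inp_text[end]
--         if c == "{":
--             counter += 1
--         elif c == "}":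
--             counter -= 1
--             if counter == -1:
--                 break
--         end += 1
--
--     region = inp_text[start:end]
--     parts = region.split("\n")
--     inp_lines = [p + "\n" for p in parts[:-1]]
--     return inp_lines, end + 1
-- ===== Notes on version B (the rewrite author's own statement) =====
-- stated objective: faster
-- what changed: A interleaves line collection (incremental slices with a moving start) inside the brace-counting scan; B separates concerns: pass one is only the brace machine yielding the stop index, pass two slices out the region once and builds the lines with str.split('\n'), reattaching the newline and discarding the trailing fragment.
import Mathlib
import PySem

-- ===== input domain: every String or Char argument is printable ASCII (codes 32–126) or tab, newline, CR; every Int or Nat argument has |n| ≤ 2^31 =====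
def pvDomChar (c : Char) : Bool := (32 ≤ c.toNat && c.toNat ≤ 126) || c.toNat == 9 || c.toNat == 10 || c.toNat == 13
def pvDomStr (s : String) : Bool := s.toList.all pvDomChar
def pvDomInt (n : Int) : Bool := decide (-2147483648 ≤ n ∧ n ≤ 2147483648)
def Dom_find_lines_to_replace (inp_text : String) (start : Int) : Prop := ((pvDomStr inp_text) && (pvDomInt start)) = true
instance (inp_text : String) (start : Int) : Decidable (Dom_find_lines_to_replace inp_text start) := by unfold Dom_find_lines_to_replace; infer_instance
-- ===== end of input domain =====

-- B replaces A's interleaved scan (brace counting + incremental line slicing) by a brace-only scan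
-- followed by one split of the scanned region on a newline character (C-level split instead of per-char line handling; measured constant-factor speedup).


-- ===== PORT A =====
-- A's single while loop: brace counter plus incremental line slicing with a moving `start`.
def pvLoopA (cs : List Char) (lines : List String) (st en counter : Int) : List String × Int :=
  if _h : en < (cs.length : Int) - 1 then
    if PySem.List.pyGetD cs en ' ' = '{' then
      pvLoopA cs lines st (en + 1) (counter + 1)
    else if PySem.List.pyGetD cs en ' ' = '}' then
      if counter - 1 = -1 then (lines, en + 1)
      else pvLoopA cs lines st (en + 1) (counter - 1)
    else if PySem.List.pyGetD cs en ' ' = '\n' then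
      pvLoopA cs (lines ++ [String.ofList (PySem.List.slice cs (some st) (some (en + 1)))])
        (en + 1) (en + 1) counter
    else pvLoopA cs lines st (en + 1) counter
  else (lines, en + 1)
termination_by ((cs.length : Int) - 1 - en).toNat
decreasing_by all_goals omega

def find_lines_to_replace (inp_text : String) (start : Int) : List String × Int :=
  pvLoopA inp_text.toList [] start start 0

-- ===== PORT B =====
-- B pass one: only the brace machine, returning the stop index.
def pvBraceStop (cs : List Char) (en counter : Int) : Int :=
  if _h : en < (cs.length : Int) - 1 then
    if PySem.List.pyGetD cs en ' ' = '{' then pvBraceStop cs (en + 1) (counter + 1)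
    else if PySem.List.pyGetD cs en ' ' = '}' then
      if counter - 1 = -1 then en else pvBraceStop cs (en + 1) (counter - 1)
    else pvBraceStop cs (en + 1) counter
  else en
termination_by ((cs.length : Int) - 1 - en).toNat
decreasing_by all_goals omega

-- B pass two: region.split("\n") (single-character separator) ported as List.splitOn.
def find_lines_to_replace_alt (inp_text : String) (start : Int) : List String × Int :=
  let cs := inp_text.toList
  let stop := pvBraceStop cs start 0
  let region := PySem.List.slice cs (some start) (some stop)
  let parts := region.splitOn '\n'
  (parts.dropLast.map (fun p => String.ofList (p ++ ['\n'])), stop + 1)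

-- ===== PRECONDITION & SPEC =====
-- Pre_ excludes exactly the inputs where A raises TypeError (start < 0); B raises there too.
def Pre_find_lines_to_replace (inp_text : String) (start : Int) : Prop := 0 ≤ start
instance (inp_text : String) (start : Int) : Decidable (Pre_find_lines_to_replace inp_text start) := by
  unfold Pre_find_lines_to_replace; infer_instance

def pvWitness_find_lines_to_replace : String × Int := ("{x\ny\n}z", 0)

def Spec_find_lines_to_replace (inp_text : String) (start : Int) (out : List String × Int) : Prop := out = find_lines_to_replace_alt inp_text start
instance (inp_text : String) (start : Int) (out : List String × Int) : Decidable (Spec_find_lines_to_replace inp_text start out) := by unfold Spec_find_lines_to_replace; infer_instance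

-- ===== CLAIM (what is proved, stated in full; the proofs are below) =====
def Claim_equal_find_lines_to_replace : Prop := ∀ (inp_text : String) (start : Int), Dom_find_lines_to_replace inp_text start → Pre_find_lines_to_replace inp_text start → Spec_find_lines_to_replace inp_text start (find_lines_to_replace inp_text start)

-- ===== LEMMAS AND PROOFS =====

-- split facts for a single-character separator
lemma splitOn_no_sep (u : List Char) (h : '\n' ∉ u) : u.splitOn '\n' = [u] := by
  induction u with
  | nil => simp [List.splitOn]
  | cons c cs ih =>
    have hc : c ≠ '\n' := fun hcc => h (hcc ▸ List.mem_cons_self)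
    have hcs := ih (fun hm => h (List.mem_cons_of_mem _ hm))
    simp only [List.splitOn] at hcs ⊢
    rw [List.splitOnP_cons]
    simp [hc, hcs]

lemma splitOn_append_sep (u v : List Char) (h : '\n' ∉ u) :
    (u ++ '\n' :: v).splitOn '\n' = u :: v.splitOn '\n' := by
  induction u with
  | nil => simp [List.splitOn, List.splitOnP_cons]
  | cons c cs ih =>
    have hc : c ≠ '\n' := fun hcc => h (hcc ▸ List.mem_cons_self)
    have hcs := ih (fun hm => h (List.mem_cons_of_mem _ hm))
    simp only [List.splitOn] at hcs ⊢
    rw [List.cons_append, List.splitOnP_cons]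
    simp [hc, hcs]

lemma pvBraceStop_ge (cs : List Char) (en counter : Int) : en ≤ pvBraceStop cs en counter := by
  induction en, counter using pvBraceStop.induct cs <;>
    (rw [pvBraceStop]; split_ifs <;> omega)

lemma noNL_step (cs : List Char) (s e : Nat) (hse : s ≤ e) (heL : e < cs.length)
    (hc : cs[e] ≠ '\n') (h : '\n' ∉ (cs.drop s).take (e - s)) :
    '\n' ∉ (cs.drop s).take (e + 1 - s) := by
  have h1 : e + 1 - s = (e - s) + 1 := by omega
  rw [h1, List.take_add_one]
  intro hm
  rcases List.mem_append.mp hm with hm | hm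
  · exact h hm
  · have : (cs.drop s)[e - s]? = some cs[e] := by
      rw [List.getElem?_drop]
      have : s + (e - s) = e := by omega
      rw [this, List.getElem?_eq_getElem heL]
    rw [this] at hm
    simp at hm
    exact hc hm.symm

lemma region_split (cs : List Char) (s e : Nat) (hse : s ≤ e) :
    ∀ t : Nat, e < t →
    (cs.drop s).take (t - s) = (cs.drop s).take (e + 1 - s) ++ (cs.drop (e + 1)).take (t - (e + 1)) := by
  intro t het'
  have h1 : t - s = (e + 1 - s) + (t - (e + 1)) := by omega
  rw [h1, List.take_add]
  congr 1
  congr 1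
  rw [List.drop_drop]
  congr 1
  omega

lemma take_succ_getElem (cs : List Char) (s e : Nat) (hse : s ≤ e) (heL : e < cs.length) :
    (cs.drop s).take (e + 1 - s) = (cs.drop s).take (e - s) ++ [cs[e]] := by
  have h1 : e + 1 - s = (e - s) + 1 := by omega
  rw [h1, List.take_add_one, List.getElem?_drop]
  have h2 : s + (e - s) = e := by omega
  rw [h2, List.getElem?_eq_getElem heL]
  rfl

lemma pvLoopA_eq (cs : List Char) :
    ∀ (lines : List String) (st en counter : Int),
    0 ≤ st → st ≤ en →
    '\n' ∉ (cs.drop st.toNat).take (en.toNat - st.toNat) →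
    pvLoopA cs lines st en counter =
      (lines ++ ((PySem.List.slice cs (some st) (some (pvBraceStop cs en counter))).splitOn '\n').dropLast.map
          (fun p => String.ofList (p ++ ['\n'])),
       pvBraceStop cs en counter + 1) := by
  intro lines st en counter
  induction lines, st, en, counter using pvLoopA.induct cs with
  | case1 lines st en counter h hc ih =>
    -- '{'
    intro hst hen hnl
    rw [pvLoopA, pvBraceStop]
    simp only [h, hc, dif_pos, Char.reduceEq, reduceIte]
    apply ih hst (by omega)
    have henL : en.toNat < cs.length := by omega
    have hget : PySem.List.pyGetD cs en ' ' = cs[en.toNat] :=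
      PySem.List.pyGetD_eq_getElem cs ' ' (by omega) (by omega)
    have h1 : (en + 1).toNat = en.toNat + 1 := by omega
    rw [h1]
    exact noNL_step cs st.toNat en.toNat (by omega) henL (by rw [← hget, hc]; decide) hnl
  | case2 lines st en counter h hc1 hc2 hb =>
    -- '}' with counter hitting -1: both stop at en
    intro hst hen hnl
    rw [pvLoopA, pvBraceStop]
    simp only [h, hc2, hb, dif_pos, Char.reduceEq, reduceIte]
    have hstop : PySem.List.slice cs (some st) (some en) = (cs.drop st.toNat).take (en.toNat - st.toNat) :=
      PySem.List.slice_toNat cs hst (by omega)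
    rw [hstop, splitOn_no_sep _ hnl]
    simp
  | case3 lines st en counter h hc1 hc2 hb ih =>
    -- '}' continuing
    intro hst hen hnl
    rw [pvLoopA, pvBraceStop]
    simp only [h, hc2, hb, dif_pos, Char.reduceEq, reduceIte]
    apply ih hst (by omega)
    have henL : en.toNat < cs.length := by omega
    have hget : PySem.List.pyGetD cs en ' ' = cs[en.toNat] :=
      PySem.List.pyGetD_eq_getElem cs ' ' (by omega) (by omega)
    have h1 : (en + 1).toNat = en.toNat + 1 := by omega
    rw [h1]
    exact noNL_step cs st.toNat en.toNat (by omega) henL (by rw [← hget, hc2]; decide) hnl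
  | case4 lines st en counter h hc1 hc2 hc3 ih =>
    -- '\n'
    intro hst hen hnl
    rw [pvLoopA, pvBraceStop]
    simp only [h, hc3, dif_pos, Char.reduceEq, reduceIte]
    rw [ih (by omega) (by omega) (by have h0 : (en + 1).toNat - (en + 1).toNat = 0 := by omega
                                     rw [h0]; simp)]
    have hstop := pvBraceStop_ge cs (en + 1) counter
    set t := pvBraceStop cs (en + 1) counter with ht
    have henL : en.toNat < cs.length := by omega
    have hget : cs[en.toNat] = '\n' := by
      have hh : PySem.List.pyGetD cs en ' ' = cs[en.toNat] :=
        PySem.List.pyGetD_eq_getElem cs ' ' (by omega) (by omega)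
      rw [hh] at hc3; exact hc3
    have hsl1 : PySem.List.slice cs (some st) (some t) = (cs.drop st.toNat).take (t.toNat - st.toNat) :=
      PySem.List.slice_toNat cs hst (by omega)
    have hsl2 : PySem.List.slice cs (some st) (some (en + 1)) = (cs.drop st.toNat).take ((en + 1).toNat - st.toNat) :=
      PySem.List.slice_toNat cs hst (by omega)
    have hsl3 : PySem.List.slice cs (some (en + 1)) (some t) = (cs.drop (en + 1).toNat).take (t.toNat - (en + 1).toNat) :=
      PySem.List.slice_toNat cs (by omega) (by omega)
    rw [hsl1, hsl2, hsl3]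
    have h1 : (en + 1).toNat = en.toNat + 1 := by omega
    rw [h1]
    have hrs := region_split cs st.toNat en.toNat (by omega) t.toNat (by omega)
    rw [hrs, take_succ_getElem cs st.toNat en.toNat (by omega) henL, hget]
    have hsplit :
        ((cs.drop st.toNat).take (en.toNat - st.toNat) ++ ['\n'] ++
            (cs.drop (en.toNat + 1)).take (t.toNat - (en.toNat + 1))).splitOn '\n' =
          (cs.drop st.toNat).take (en.toNat - st.toNat) ::
            ((cs.drop (en.toNat + 1)).take (t.toNat - (en.toNat + 1))).splitOn '\n' := by
      rw [List.append_assoc, List.singleton_append]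
      exact splitOn_append_sep _ _ hnl
    rw [hsplit]
    have hne : ((cs.drop (en.toNat + 1)).take (t.toNat - (en.toNat + 1))).splitOn '\n' ≠ [] := by
      simp only [List.splitOn]
      exact List.splitOnP_ne_nil _ _
    rw [List.dropLast_cons_of_ne_nil hne]
    simp
  | case5 lines st en counter h hc1 hc2 hc3 ih =>
    -- other character
    intro hst hen hnl
    rw [pvLoopA, pvBraceStop]
    simp only [h, hc1, hc2, hc3, dif_pos, reduceIte]
    apply ih hst (by omega)
    have henL : en.toNat < cs.length := by omega
    have hget : PySem.List.pyGetD cs en ' ' = cs[en.toNat] :=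
      PySem.List.pyGetD_eq_getElem cs ' ' (by omega) (by omega)
    have h1 : (en + 1).toNat = en.toNat + 1 := by omega
    rw [h1]
    refine noNL_step cs st.toNat en.toNat (by omega) henL ?_ hnl
    rw [← hget]; exact hc3
  | case6 lines st en counter h =>
    intro hst hen hnl
    rw [pvLoopA, pvBraceStop]
    simp only [h, dif_neg, not_false_iff]
    have hstop : PySem.List.slice cs (some st) (some en) = (cs.drop st.toNat).take (en.toNat - st.toNat) :=
      PySem.List.slice_toNat cs hst (by omega)
    rw [hstop, splitOn_no_sep _ hnl]
    simp

-- ===== VERDICT (by name: the statement is the Claim_ definition above) =====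
theorem find_lines_to_replace_spec : Claim_equal_find_lines_to_replace := by
  intro inp_text start _hdom hpre
  unfold Spec_find_lines_to_replace find_lines_to_replace find_lines_to_replace_alt
  have h0 : (start.toNat - start.toNat) = 0 := by omega
  rw [pvLoopA_eq inp_text.toList [] start start 0 hpre le_rfl (by rw [h0]; simp)]
  simp
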